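-- pv_equiv track=rewrite | github.com/LudoNocco/DSA-HELSINKI-UNIVERSITY | WEEK 4/samesplit.py | count_splits
-- ===== SOURCE A (Python) =====
-- def count_splits(numbers):
--     prima_occ = {}
--     ultima_occ = {}
--
--     for i, num in enumerate(numbers):
--         if num not in prima_occ:
--             prima_occ[num] = i
--         ultima_occ[num] = i
--
--     for num in prima_occ:
--         if prima_occ[num] == ultima_occ[num]:
--             return 0
--
--     max_prima = max(prima_occ.values())
--     min_ultima = min(ultima_occ.values())
--
--     return max(0, min_ultima - max_prima)
-- ===== SOURCE B (Python) =====
-- def count_splits(numbers):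
--     nums = list(numbers)
--     n = len(nums)
--     total = len(set(nums))
--     seen = set()
--     prefix_full = []
--     for v in nums:
--         seen.add(v)
--         prefix_full.append(len(seen) == total)
--     seen = set()
--     suffix_full = []
--     for v in reversed(nums):
--         seen.add(v)
--         suffix_full.append(len(seen) == total)
--     suffix_full.reverse()
--     count = 0
--     for k in range(1, n):
--         if prefix_full[k - 1] and suffix_full[k]:
--             count += 1
--     return count
-- ===== Notes on version B (the rewrite author's own statement) =====
-- stated objective: alternative
-- what changed: B counts the valid split points directly (prefix/suffix distinct-value coverage tables built with sets, then one counting pass over the split positions) instead of A's first/last-occurrence dictionaries with a unique-value early return and the max/min index formula.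
import Mathlib
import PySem

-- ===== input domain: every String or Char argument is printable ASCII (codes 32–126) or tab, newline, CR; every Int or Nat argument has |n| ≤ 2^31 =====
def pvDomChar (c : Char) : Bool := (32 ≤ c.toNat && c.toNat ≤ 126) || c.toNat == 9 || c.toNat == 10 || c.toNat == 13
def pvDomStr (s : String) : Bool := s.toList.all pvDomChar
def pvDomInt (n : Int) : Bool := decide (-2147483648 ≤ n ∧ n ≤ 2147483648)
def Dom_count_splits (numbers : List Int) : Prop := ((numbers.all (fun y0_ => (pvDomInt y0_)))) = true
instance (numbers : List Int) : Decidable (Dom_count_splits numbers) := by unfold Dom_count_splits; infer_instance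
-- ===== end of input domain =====

-- B counts the valid split points directly with prefix/suffix distinct-count passes instead of
-- A's first/last-occurrence dictionaries and max/min formula (objective: alternative, same O(n) cost).

-- ===== PORT A =====
-- A's 'for num in prima_occ: if …: return 0' early-return scan is ported as an 'any' test (the
-- returned value, 0, does not depend on which key fires). Python's max()/min() on the dict values
-- raise ValueError on empty input; the port's '.getD 0' there is unreachable under Pre_.
def count_splits (numbers : List Int) : Int :=
  let st := (PySem.List.enumerate numbers 0).foldl
    (fun (st : PySem.Dict Int Int × PySem.Dict Int Int) p =>
      ((if st.1.contains p.2 then st.1 else st.1.insert p.2 p.1), st.2.insert p.2 p.1))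
    (PySem.Dict.empty, PySem.Dict.empty)
  if st.1.keys.any (fun num => st.1.getD num 0 == st.2.getD num 0) then 0
  else
    let max_prima := (PySem.List.max? st.1.values (fun x => x)).getD 0
    let min_ultima := (PySem.List.min? st.2.values (fun x => x)).getD 0
    max 0 (min_ultima - max_prima)

-- ===== PORT B =====
def count_splits_alt (numbers : List Int) : Int :=
  let nums := numbers
  let n := nums.length
  let total := PySem.Set.len (PySem.Set.ofList nums)
  let prefix_full := (nums.foldl
      (fun (st : PySem.Set Int × List Bool) v =>
        let s := PySem.Set.add st.1 v
        (s, st.2 ++ [PySem.Set.len s == total]))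
      ((PySem.Set.empty : PySem.Set Int), [])).2
  let suffix_full := ((nums.reverse.foldl
      (fun (st : PySem.Set Int × List Bool) v =>
        let s := PySem.Set.add st.1 v
        (s, st.2 ++ [PySem.Set.len s == total]))
      ((PySem.Set.empty : PySem.Set Int), [])).2).reverse
  (PySem.List.pyRange 1 (n : Int) 1).foldl
    (fun count k =>
      if PySem.List.pyGetD prefix_full (k - 1) false && PySem.List.pyGetD suffix_full k false
      then count + 1 else count) 0

-- ===== PRECONDITION & SPEC =====
-- A raises ValueError (max() of an empty sequence) on the empty list; Pre_ excludes exactly that input.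
def Pre_count_splits (numbers : List Int) : Prop := numbers ≠ []
instance (numbers : List Int) : Decidable (Pre_count_splits numbers) := by unfold Pre_count_splits; infer_instance
def pvWitness_count_splits : List Int := [1, 2, 1, 2]

def Spec_count_splits (numbers : List Int) (out : Int) : Prop := out = count_splits_alt numbers
instance (numbers : List Int) (out : Int) : Decidable (Spec_count_splits numbers out) := by unfold Spec_count_splits; infer_instance

-- ===== CLAIM (what is proved, stated in full; the proofs are below) =====
def Claim_equal_count_splits : Prop := ∀ (numbers : List Int), Dom_count_splits numbers → Pre_count_splits numbers → Spec_count_splits numbers (count_splits numbers)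

-- ===== LEMMAS AND PROOFS =====

def pvStepA (st : PySem.Dict Int Int × PySem.Dict Int Int) (p : Int × Int) :
    PySem.Dict Int Int × PySem.Dict Int Int :=
  ((if st.1.contains p.2 then st.1 else st.1.insert p.2 p.1), st.2.insert p.2 p.1)

def pvFoldA (xs : List Int) (s : Int) (st : PySem.Dict Int Int × PySem.Dict Int Int) :
    PySem.Dict Int Int × PySem.Dict Int Int :=
  (PySem.List.enumerate xs s).foldl pvStepA st

theorem pvFoldA_fst_get (xs : List Int) (s : Int) (d1 d2 : PySem.Dict Int Int) (v : Int) :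
    (pvFoldA xs s (d1, d2)).1.get? v =
      match d1.get? v, PySem.List.index? xs v with
      | some w, _ => some w
      | none, some i => some (s + (i : Int))
      | none, none => none := by
  induction xs generalizing s d1 d2 with
  | nil => cases h : d1.get? v <;> simp [pvFoldA, PySem.List.enumerate_nil, PySem.List.index?, h]
  | cons x t ih =>
    have hstep : pvFoldA (x :: t) s (d1, d2) =
        pvFoldA t (s + 1) (pvStepA (d1, d2) (s, x)) := by
      simp [pvFoldA, PySem.List.enumerate_cons]
    rw [hstep]
    by_cases hc : d1.contains x
    · have h1 : pvStepA (d1, d2) (s, x) = (d1, d2.insert x s) := by simp [pvStepA, hc]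
      rw [h1, ih]
      cases h : d1.get? v with
      | some w => simp
      | none =>
        have hvx : x ≠ v := by
          intro he
          rw [he] at hc
          rw [PySem.Dict.get?_eq_none_iff_contains] at h
          simp [hc] at h
        rw [PySem.List.index?_cons_of_ne t hvx]
        cases hi : PySem.List.index? t v <;> simp [hi] <;> push_cast <;> ring
    · have h1 : pvStepA (d1, d2) (s, x) = (d1.insert x s, d2.insert x s) := by simp [pvStepA, hc]
      rw [h1, ih]
      by_cases hvx : v = x
      · subst hvx
        rw [PySem.Dict.get?_insert_self]
        have h : d1.get? v = none := by
          rw [PySem.Dict.get?_eq_none_iff_contains]; simp [hc]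
        rw [PySem.List.index?_cons_self]
        simp [h]
      · rw [PySem.Dict.get?_insert_of_ne d1 s hvx]
        cases h : d1.get? v with
        | some w => simp
        | none =>
          rw [PySem.List.index?_cons_of_ne t (fun he => hvx he.symm)]
          cases hi : PySem.List.index? t v <;> simp [hi] <;> push_cast <;> ring

theorem pvFoldA_fst_keys (xs : List Int) (s : Int) (d1 d2 : PySem.Dict Int Int) :
    (pvFoldA xs s (d1, d2)).1.keys = PySem.Set.update d1.keys xs := by
  induction xs generalizing s d1 d2 with
  | nil => simp [pvFoldA, PySem.List.enumerate_nil, PySem.Set.update]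
  | cons x t ih =>
    have hstep : pvFoldA (x :: t) s (d1, d2) =
        pvFoldA t (s + 1) (pvStepA (d1, d2) (s, x)) := by
      simp [pvFoldA, PySem.List.enumerate_cons]
    rw [hstep, PySem.Set.update_cons]
    by_cases hc : d1.contains x
    · have h1 : pvStepA (d1, d2) (s, x) = (d1, d2.insert x s) := by simp [pvStepA, hc]
      rw [h1, ih]
      have : PySem.Set.add d1.keys x = d1.keys :=
        PySem.Set.add_of_mem ((PySem.Dict.contains_iff_mem_keys d1 x).1 hc)
      rw [this]
    · have h1 : pvStepA (d1, d2) (s, x) = (d1.insert x s, d2.insert x s) := by simp [pvStepA, hc]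
      rw [h1, ih, PySem.Dict.keys_insert_of_not_contains d1 s (by simp [hc])]
      have hx : x ∉ d1.keys := fun hm => hc ((PySem.Dict.contains_iff_mem_keys d1 x).2 hm)
      rw [PySem.Set.add_of_not_mem hx]

theorem pvFoldA_snd_keys (xs : List Int) (s : Int) (d1 d2 : PySem.Dict Int Int) :
    (pvFoldA xs s (d1, d2)).2.keys = PySem.Set.update d2.keys xs := by
  induction xs generalizing s d1 d2 with
  | nil => simp [pvFoldA, PySem.List.enumerate_nil, PySem.Set.update]
  | cons x t ih =>
    have hstep : pvFoldA (x :: t) s (d1, d2) =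
        pvFoldA t (s + 1) (pvStepA (d1, d2) (s, x)) := by
      simp [pvFoldA, PySem.List.enumerate_cons]
    rw [hstep, PySem.Set.update_cons]
    have h1 : (pvStepA (d1, d2) (s, x)).2 = d2.insert x s := by simp [pvStepA]
    by_cases hc2 : d2.contains x
    · have : pvFoldA t (s+1) (pvStepA (d1, d2) (s, x)) =
          pvFoldA t (s+1) ((pvStepA (d1, d2) (s, x)).1, d2.insert x s) := by rw [← h1]
      rw [this, ih]
      rw [PySem.Dict.keys_insert_of_contains d2 s hc2]
      have : PySem.Set.add d2.keys x = d2.keys :=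
        PySem.Set.add_of_mem ((PySem.Dict.contains_iff_mem_keys d2 x).1 hc2)
      rw [this]
    · have : pvFoldA t (s+1) (pvStepA (d1, d2) (s, x)) =
          pvFoldA t (s+1) ((pvStepA (d1, d2) (s, x)).1, d2.insert x s) := by rw [← h1]
      rw [this, ih, PySem.Dict.keys_insert_of_not_contains d2 s (by simp [hc2])]
      have hx : x ∉ d2.keys := fun hm => hc2 ((PySem.Dict.contains_iff_mem_keys d2 x).2 hm)
      rw [PySem.Set.add_of_not_mem hx]

theorem pvFoldA_snd_get (xs : List Int) (s : Int) (d1 d2 : PySem.Dict Int Int) (v : Int) :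
    (pvFoldA xs s (d1, d2)).2.get? v =
      match PySem.List.index? xs.reverse v with
      | some r => some (s + ((xs.length - 1 - r : Nat) : Int))
      | none => d2.get? v := by
  induction xs using List.reverseRecOn generalizing s d1 d2 with
  | nil => simp [pvFoldA, PySem.List.enumerate_nil, PySem.List.index?]
  | append_singleton t x ih =>
    have hstep : pvFoldA (t ++ [x]) s (d1, d2) =
        pvStepA (pvFoldA t s (d1, d2)) (s + t.length, x) := by
      simp [pvFoldA, PySem.List.enumerate_append, PySem.List.enumerate_cons,
        PySem.List.enumerate_nil, List.foldl_append]
    have hsnd : (pvFoldA (t ++ [x]) s (d1, d2)).2 =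
        ((pvFoldA t s (d1, d2)).2).insert x (s + t.length) := by
      rw [hstep]; rfl
    rw [hsnd, List.reverse_append]
    simp only [List.reverse_singleton, List.singleton_append]
    by_cases hvx : v = x
    · subst hvx
      rw [PySem.Dict.get?_insert_self, PySem.List.index?_cons_self]
      simp
    · rw [PySem.Dict.get?_insert_of_ne _ _ hvx,
        PySem.List.index?_cons_of_ne _ (fun he => hvx he.symm), ih]
      cases hi : PySem.List.index? t.reverse v with
      | none => simp
      | some r =>
        obtain ⟨hr, -, -⟩ := PySem.List.getElem_of_index?_eq_some hi
        rw [List.length_reverse] at hr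
        simp only [Option.map_some, List.length_append, List.length_singleton]
        have : t.length + 1 - 1 - (r + 1) = t.length - 1 - r := by omega
        rw [this]

theorem pvMem_values_iff {d : PySem.Dict Int Int} (hnd : d.keys.Nodup) (w : Int) :
    w ∈ d.values ↔ ∃ k ∈ d.keys, d.get? k = some w := by
  constructor
  · intro hw
    simp only [PySem.Dict.values, List.mem_map] at hw
    obtain ⟨p, hp, hpw⟩ := hw
    refine ⟨p.1, ?_, ?_⟩
    · simp only [PySem.Dict.keys, List.mem_map]; exact ⟨p, hp, rfl⟩
    · have := PySem.Dict.get?_of_mem_items d (k := p.1) (v := p.2) (by simpa using hp) hnd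
      rw [this, hpw]
  · rintro ⟨k, hk, hget⟩
    simp only [PySem.Dict.keys, List.mem_map] at hk
    obtain ⟨p, hp, hpk⟩ := hk
    have := PySem.Dict.get?_of_mem_items d (k := p.1) (v := p.2) (by simpa using hp) hnd
    rw [hpk] at this
    rw [this] at hget
    obtain rfl : p.2 = w := by injection hget
    simp only [PySem.Dict.values, List.mem_map]
    exact ⟨p, hp, rfl⟩

def pvStepB (total : Int) (st : PySem.Set Int × List Bool) (v : Int) : PySem.Set Int × List Bool :=
  let s := PySem.Set.add st.1 v
  (s, st.2 ++ [PySem.Set.len s == total])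

theorem pvFoldB_snd (total : Int) (l : List Int) (s : PySem.Set Int) (acc : List Bool) :
    (l.foldl (pvStepB total) (s, acc)).2 =
      acc ++ (List.range l.length).map
        (fun i => PySem.Set.len (PySem.Set.update s (l.take (i+1))) == total) := by
  induction l generalizing s acc with
  | nil => simp
  | cons x t ih =>
    simp only [List.foldl_cons, List.length_cons]
    rw [show pvStepB total (s, acc) x
        = (PySem.Set.add s x, acc ++ [PySem.Set.len (PySem.Set.add s x) == total]) from rfl, ih]
    rw [List.range_succ_eq_map]
    simp only [List.map_cons, List.map_map, List.take_succ_cons]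
    rw [List.append_assoc]
    simp only [List.singleton_append]
    congr 2

-- first-occurrence index decides prefix membership
theorem pvMemTake {xs : List Int} {v : Int} {i : Nat}
    (h : PySem.List.index? xs v = some i) (k : Nat) :
    v ∈ xs.take k ↔ i < k := by
  obtain ⟨hi, hv, hmin⟩ := PySem.List.getElem_of_index?_eq_some h
  rw [List.mem_take_iff_getElem]
  constructor
  · rintro ⟨j, hj, hjv⟩
    by_contra hk
    push_neg at hk
    have hji : j < i := by
      rcases Nat.lt_or_ge j i with h' | h'
      · exact h'
      · omega
    exact hmin j hji hjv
  · intro hik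
    exact ⟨i, by omega, hv⟩

-- last-occurrence index decides suffix membership
theorem pvMemDrop {xs : List Int} {v : Int} {r : Nat}
    (h : PySem.List.index? xs.reverse v = some r) (k : Nat) :
    v ∈ xs.drop k ↔ k ≤ xs.length - 1 - r ∧ k < xs.length := by
  obtain ⟨hr, -, -⟩ := PySem.List.getElem_of_index?_eq_some h
  rw [List.length_reverse] at hr
  have hmem : v ∈ xs.drop k ↔ v ∈ (xs.reverse.take (xs.length - k)) := by
    rw [← List.reverse_drop, List.mem_reverse]
  rw [hmem, pvMemTake h]
  omega

-- |set(l')| == |set(xs)| tests whether l' covers all values of xs, for l' ⊆ xs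
theorem pvFull_iff {l' xs : List Int} (hsub : ∀ v ∈ l', v ∈ xs) :
    ((PySem.Set.len (PySem.Set.ofList l') == PySem.Set.len (PySem.Set.ofList xs)) = true)
      ↔ ∀ v ∈ xs, v ∈ l' := by
  rw [beq_iff_eq]
  simp only [PySem.Set.len, Nat.cast_inj]
  constructor
  · intro hlen v hvxs
    have hsubl : PySem.Set.ofList l' ⊆ PySem.Set.ofList xs := by
      intro y hy
      rw [PySem.Set.mem_ofList] at hy ⊢
      exact hsub y hy
    have hperm := ((PySem.Set.nodup_ofList l').subperm hsubl).perm_of_length_le (by omega)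
    have := (hperm.mem_iff (a := v)).2 ((PySem.Set.mem_ofList xs v).2 hvxs)
    exact (PySem.Set.mem_ofList l' v).1 this
  · intro hall
    have hperm : (PySem.Set.ofList l').Perm (PySem.Set.ofList xs) := by
      rw [List.perm_ext_iff_of_nodup (PySem.Set.nodup_ofList l') (PySem.Set.nodup_ofList xs)]
      intro a
      rw [PySem.Set.mem_ofList, PySem.Set.mem_ofList]
      exact ⟨fun h => hsub a h, fun h => hall a h⟩
    exact hperm.length_eq

-- counting an integer interval inside range N
theorem pvCount (N : Nat) (a b : Int) (ha : 0 ≤ a) :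
    ((List.range N).countP (fun (j : Nat) => decide (a ≤ (j : Int) ∧ (j : Int) < b)))
      = (min b (N : Int) - a).toNat := by
  induction N with
  | zero => simp; omega
  | succ N ih =>
    rw [List.range_succ, List.countP_append, ih]
    simp only [List.countP_cons, List.countP_nil]
    by_cases h : a ≤ (N : Int) ∧ (N : Int) < b
    · rw [decide_eq_true h]
      simp only [if_true]
      obtain ⟨h1, h2⟩ := h
      push_cast
      omega
    · have : (decide (a ≤ (N : Int) ∧ (N : Int) < b)) = false := by
        simpa using h
      rw [this]
      simp only [Bool.false_eq_true, if_neg]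
      push_cast at h ⊢
      omega


def pvTotal (xs : List Int) : Int := PySem.Set.len (PySem.Set.ofList xs)
def pvPF (xs : List Int) : List Bool :=
  (xs.foldl (pvStepB (pvTotal xs)) ((PySem.Set.empty : PySem.Set Int), [])).2
def pvSF (xs : List Int) : List Bool :=
  ((xs.reverse.foldl (pvStepB (pvTotal xs)) ((PySem.Set.empty : PySem.Set Int), [])).2).reverse

-- the two ports, restated over the named helpers (definitional)
theorem pvA_eq (xs : List Int) : count_splits xs =
    (if (pvFoldA xs 0 (PySem.Dict.empty, PySem.Dict.empty)).1.keys.any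
        (fun num => (pvFoldA xs 0 (PySem.Dict.empty, PySem.Dict.empty)).1.getD num 0
          == (pvFoldA xs 0 (PySem.Dict.empty, PySem.Dict.empty)).2.getD num 0) then 0
     else max 0 (((PySem.List.min? (pvFoldA xs 0 (PySem.Dict.empty, PySem.Dict.empty)).2.values (fun x => x)).getD 0)
       - ((PySem.List.max? (pvFoldA xs 0 (PySem.Dict.empty, PySem.Dict.empty)).1.values (fun x => x)).getD 0))) := rfl

theorem pvB_eq (xs : List Int) : count_splits_alt xs =
    (PySem.List.pyRange 1 (xs.length : Int) 1).foldl
      (fun count k =>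
        if PySem.List.pyGetD (pvPF xs) (k - 1) false && PySem.List.pyGetD (pvSF xs) k false
        then count + 1 else count) 0 := rfl

theorem pvMain (xs : List Int) (hne : xs ≠ []) :
    count_splits xs = count_splits_alt xs := by
  have hn1 : 1 ≤ xs.length := List.length_pos_iff.2 hne
  set n := xs.length with hn
  set prima := (pvFoldA xs 0 (PySem.Dict.empty, PySem.Dict.empty)).1 with hprima
  set ultima := (pvFoldA xs 0 (PySem.Dict.empty, PySem.Dict.empty)).2 with hultima
  -- keys of the two dictionaries
  have hk1 : prima.keys = PySem.Set.ofList xs := by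
    rw [hprima, pvFoldA_fst_keys, PySem.Dict.keys_empty, PySem.Set.update_nil_left]
  have hk2 : ultima.keys = PySem.Set.ofList xs := by
    rw [hultima, pvFoldA_snd_keys, PySem.Dict.keys_empty, PySem.Set.update_nil_left]
  have hnd1 : prima.keys.Nodup := by rw [hk1]; exact PySem.Set.nodup_ofList xs
  have hnd2 : ultima.keys.Nodup := by rw [hk2]; exact PySem.Set.nodup_ofList xs
  -- lookups
  have hg1 : ∀ v : Int, prima.get? v =
      match PySem.List.index? xs v with
      | some i => some ((i : Int))
      | none => none := by
    intro v
    rw [hprima, pvFoldA_fst_get, PySem.Dict.get?_empty]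
    cases h : PySem.List.index? xs v <;> simp
  have hg2 : ∀ v : Int, ultima.get? v =
      match PySem.List.index? xs.reverse v with
      | some r => some (((n - 1 - r : Nat) : Int))
      | none => none := by
    intro v
    rw [hultima, pvFoldA_snd_get, PySem.Dict.get?_empty]
    cases h : PySem.List.index? xs.reverse v <;> simp [hn]
  -- values characterisations
  have hval1 : ∀ w : Int, w ∈ prima.values ↔
      ∃ v ∈ xs, ∃ i : Nat, PySem.List.index? xs v = some i ∧ w = (i : Int) := by
    intro w
    rw [pvMem_values_iff hnd1]
    constructor
    · rintro ⟨k, hk, hget⟩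
      rw [hg1 k] at hget
      cases h : PySem.List.index? xs k with
      | none => rw [h] at hget; cases hget
      | some i =>
        rw [h] at hget
        refine ⟨k, ?_, i, h, ?_⟩
        · exact (PySem.Set.mem_ofList xs k).1 (hk1 ▸ hk)
        · injection hget with h'; exact h'.symm
    · rintro ⟨v, hv, i, hi, rfl⟩
      refine ⟨v, hk1 ▸ (PySem.Set.mem_ofList xs v).2 hv, ?_⟩
      rw [hg1 v, hi]
  have hval2 : ∀ w : Int, w ∈ ultima.values ↔
      ∃ v ∈ xs, ∃ r : Nat, PySem.List.index? xs.reverse v = some r ∧ w = ((n - 1 - r : Nat) : Int) := by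
    intro w
    rw [pvMem_values_iff hnd2]
    constructor
    · rintro ⟨k, hk, hget⟩
      rw [hg2 k] at hget
      cases h : PySem.List.index? xs.reverse k with
      | none => rw [h] at hget; cases hget
      | some r =>
        rw [h] at hget
        refine ⟨k, ?_, r, h, ?_⟩
        · exact (PySem.Set.mem_ofList xs k).1 (hk2 ▸ hk)
        · injection hget with h'; exact h'.symm
    · rintro ⟨v, hv, r, hr, rfl⟩
      refine ⟨v, hk2 ▸ (PySem.Set.mem_ofList xs v).2 hv, ?_⟩
      rw [hg2 v, hr]
  -- the value lists are nonempty
  have hvne1 : prima.values ≠ [] := by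
    have hkne : prima.keys ≠ [] :=
      List.ne_nil_of_mem (hk1 ▸ (PySem.Set.mem_ofList xs _).2 (List.head_mem hne))
    intro h
    apply hkne
    have h1 : prima.values.length = prima.keys.length := by
      simp [PySem.Dict.keys, PySem.Dict.values]
    rw [h] at h1
    have h2 : prima.keys.length = 0 := by simpa using h1.symm
    exact List.eq_nil_of_length_eq_zero h2
  have hvne2 : ultima.values ≠ [] := by
    have hkne : ultima.keys ≠ [] :=
      List.ne_nil_of_mem (hk2 ▸ (PySem.Set.mem_ofList xs _).2 (List.head_mem hne))
    intro h
    apply hkne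
    have h1 : ultima.values.length = ultima.keys.length := by
      simp [PySem.Dict.keys, PySem.Dict.values]
    rw [h] at h1
    have h2 : ultima.keys.length = 0 := by simpa using h1.symm
    exact List.eq_nil_of_length_eq_zero h2
  -- the extremal values
  obtain ⟨mf, hmf⟩ : ∃ mf, PySem.List.max? prima.values (fun x => x) = some mf := by
    cases h : PySem.List.max? prima.values (fun x => x) with
    | none => exact absurd ((PySem.List.max?_eq_none_iff _ _).1 h) hvne1
    | some m => exact ⟨m, rfl⟩
  obtain ⟨ml, hml⟩ : ∃ ml, PySem.List.min? ultima.values (fun x => x) = some ml := by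
    cases h : PySem.List.min? ultima.values (fun x => x) with
    | none => exact absurd ((PySem.List.min?_eq_none_iff _ _).1 h) hvne2
    | some m => exact ⟨m, rfl⟩
  have hmfmem : mf ∈ prima.values := PySem.List.max?_mem hmf
  have hmlmem : ml ∈ ultima.values := PySem.List.min?_mem hml
  have hmfmax : ∀ y ∈ prima.values, y ≤ mf := PySem.List.max?_isMax hmf
  have hmlmin : ∀ y ∈ ultima.values, ml ≤ y := PySem.List.min?_isMin hml
  have hmfb : 0 ≤ mf ∧ mf ≤ (n : Int) - 1 := by
    obtain ⟨v, hv, i, hi, rfl⟩ := (hval1 mf).1 hmfmem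
    obtain ⟨hilt, -, -⟩ := PySem.List.getElem_of_index?_eq_some hi
    rw [← hn] at hilt
    omega
  have hmlb : 0 ≤ ml ∧ ml ≤ (n : Int) - 1 := by
    obtain ⟨v, hv, r, hr, rfl⟩ := (hval2 ml).1 hmlmem
    obtain ⟨hrlt, -, -⟩ := PySem.List.getElem_of_index?_eq_some hr
    rw [List.length_reverse, ← hn] at hrlt
    omega
  -- prefix / suffix coverage characterisations
  have hFull : ∀ K : Nat, (∀ v ∈ xs, v ∈ xs.take K) ↔ mf < (K : Int) := by
    intro K
    constructor
    · intro hall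
      obtain ⟨v, hv, i, hi, rfl⟩ := (hval1 mf).1 hmfmem
      have := (pvMemTake hi K).1 (hall v hv)
      omega
    · intro hK v hv
      obtain ⟨i, hi⟩ : ∃ i, PySem.List.index? xs v = some i := by
        have hs := (PySem.List.index?_isSome_iff xs v).2 hv
        cases h : PySem.List.index? xs v with
        | none => rw [h] at hs; cases hs
        | some i => exact ⟨i, rfl⟩
      have hiv : ((i : Nat) : Int) ∈ prima.values := (hval1 _).2 ⟨v, hv, i, hi, rfl⟩
      have := hmfmax _ hiv
      rw [pvMemTake hi]
      omega
  have hSuf : ∀ K : Nat, K < n → ((∀ v ∈ xs, v ∈ xs.drop K) ↔ (K : Int) ≤ ml) := by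
    intro K hKn
    constructor
    · intro hall
      obtain ⟨v, hv, r, hr, rfl⟩ := (hval2 ml).1 hmlmem
      have := (pvMemDrop hr K).1 (hall v hv)
      rw [← hn] at this
      omega
    · intro hK v hv
      obtain ⟨r, hr⟩ : ∃ r, PySem.List.index? xs.reverse v = some r := by
        have hs := (PySem.List.index?_isSome_iff xs.reverse v).2 (List.mem_reverse.2 hv)
        cases h : PySem.List.index? xs.reverse v with
        | none => rw [h] at hs; cases hs
        | some r => exact ⟨r, rfl⟩
      have hw : ((n - 1 - r : Nat) : Int) ∈ ultima.values := (hval2 _).2 ⟨v, hv, r, hr, rfl⟩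
      have := hmlmin _ hw
      rw [pvMemDrop hr, ← hn]
      omega
  -- A computes max 0 (ml - mf)
  have hA : count_splits xs = max 0 (ml - mf) := by
    rw [pvA_eq]
    rw [← hprima, ← hultima]
    by_cases hany : prima.keys.any (fun num => prima.getD num 0 == ultima.getD num 0)
    · rw [if_pos hany]
      rw [List.any_eq_true] at hany
      obtain ⟨v, hvk, heq⟩ := hany
      rw [beq_iff_eq] at heq
      have hvxs : v ∈ xs := (PySem.Set.mem_ofList xs v).1 (hk1 ▸ hvk)
      obtain ⟨i, hi⟩ : ∃ i, PySem.List.index? xs v = some i := by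
        have hs := (PySem.List.index?_isSome_iff xs v).2 hvxs
        cases h : PySem.List.index? xs v with
        | none => rw [h] at hs; cases hs
        | some i => exact ⟨i, rfl⟩
      obtain ⟨r, hr⟩ : ∃ r, PySem.List.index? xs.reverse v = some r := by
        have hs := (PySem.List.index?_isSome_iff xs.reverse v).2 (List.mem_reverse.2 hvxs)
        cases h : PySem.List.index? xs.reverse v with
        | none => rw [h] at hs; cases hs
        | some r => exact ⟨r, rfl⟩
      have h1 : prima.getD v 0 = (i : Int) := by
        rw [PySem.Dict.getD_eq_get?_getD, hg1 v, hi]; rfl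
      have h2 : ultima.getD v 0 = ((n - 1 - r : Nat) : Int) := by
        rw [PySem.Dict.getD_eq_get?_getD, hg2 v, hr]; rfl
      have hie : (i : Int) = ((n - 1 - r : Nat) : Int) := by rw [← h1, ← h2, heq]
      have hiv : ((i : Nat) : Int) ∈ prima.values := (hval1 _).2 ⟨v, hvxs, i, hi, rfl⟩
      have hwv : ((n - 1 - r : Nat) : Int) ∈ ultima.values := (hval2 _).2 ⟨v, hvxs, r, hr, rfl⟩
      have hle1 := hmfmax _ hiv
      have hle2 := hmlmin _ hwv
      omega
    · rw [if_neg hany, hmf, hml]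
      rfl
  -- the prefix/suffix Boolean tables
  have hpf : pvPF xs = (List.range n).map
      (fun i => PySem.Set.len (PySem.Set.ofList (xs.take (i+1))) == pvTotal xs) := by
    rw [pvPF, pvFoldB_snd]
    rfl
  have hsf : pvSF xs = ((List.range n).map
      (fun i => PySem.Set.len (PySem.Set.ofList (xs.reverse.take (i+1))) == pvTotal xs)).reverse := by
    rw [pvSF, pvFoldB_snd]
    rw [List.length_reverse]
    rfl
  have hpfl : (pvPF xs).length = n := by rw [hpf]; simp
  have hsfl : (pvSF xs).length = n := by rw [hsf]; simp
  -- B counts the interval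
  have hB : count_splits_alt xs = max 0 (ml - mf) := by
    rw [pvB_eq, ← hn, PySem.List.pyRange_one]
    rw [PySem.List.foldl_if_add_one
      (fun k => PySem.List.pyGetD (pvPF xs) (k - 1) false && PySem.List.pyGetD (pvSF xs) k false)]
    rw [List.countP_map]
    rw [List.countP_congr (q := fun (j : Nat) => decide (mf ≤ (j : Int) ∧ (j : Int) < ml)) ?_]
    · have hc : ((n : Int) - 1).toNat = n - 1 := by omega
      rw [hc, pvCount (n - 1) mf ml hmfb.1]
      have : (min ml ((n - 1 : Nat) : Int) - mf).toNat = (ml - mf).toNat := by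
        have := hmlb.2; push_cast; omega
      rw [this]
      omega
    · intro j hj
      rw [List.mem_range] at hj
      simp only [Function.comp_apply]
      have e1 : (1 + (j : Int) - 1) = ((j : Nat) : Int) := by omega
      have e2 : (1 + (j : Int)) = (((1 + j : Nat)) : Int) := by push_cast; omega
      rw [e1, e2, PySem.List.pyGetD_natCast, PySem.List.pyGetD_natCast]
      have hj1 : j < (pvPF xs).length := by omega
      have hj2 : 1 + j < (pvSF xs).length := by omega
      rw [List.getD_eq_getElem _ _ hj1, List.getD_eq_getElem _ _ hj2]
      have hgpf : (pvPF xs)[j]'hj1 =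
          (PySem.Set.len (PySem.Set.ofList (xs.take (j+1))) == pvTotal xs) := by
        have hj' : j < n := by omega
        simp only [hpf]
        rw [List.getElem_map, List.getElem_range]
      have hgsf : (pvSF xs)[1+j]'hj2 =
          (PySem.Set.len (PySem.Set.ofList (xs.reverse.take (n - (1+j)))) == pvTotal xs) := by
        simp only [hsf]
        rw [List.getElem_reverse, List.getElem_map, List.getElem_range]
        simp only [List.length_map, List.length_range]
        rw [show n - 1 - (1 + j) + 1 = n - (1 + j) from by omega]
      rw [hgpf, hgsf]
      rw [Bool.and_eq_true, decide_eq_true_iff]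
      have hfull1 := pvFull_iff (l' := xs.take (j+1)) (xs := xs)
        (fun v hv => List.take_subset _ _ hv)
      have hfull2 := pvFull_iff (l' := xs.reverse.take (n - (1+j))) (xs := xs)
        (fun v hv => List.mem_reverse.1 (List.take_subset _ _ hv))
      rw [show pvTotal xs = PySem.Set.len (PySem.Set.ofList xs) from rfl]
      rw [hfull1, hfull2]
      have hdrop : ∀ v, v ∈ xs.reverse.take (n - (1+j)) ↔ v ∈ xs.drop (1+j) := by
        intro v
        rw [hn, ← List.reverse_drop, List.mem_reverse]
      have hsame : (∀ v ∈ xs, v ∈ xs.reverse.take (n - (1+j))) ↔ (∀ v ∈ xs, v ∈ xs.drop (1+j)) := by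
        constructor <;> intro h v hv <;> [exact (hdrop v).1 (h v hv); exact (hdrop v).2 (h v hv)]
      rw [hsame, hFull (j+1), hSuf (1+j) (by omega)]
      constructor
      · rintro ⟨ha, hb⟩; push_cast at ha hb ⊢; omega
      · rintro ⟨ha, hb⟩; push_cast at ha hb ⊢; omega
  rw [hA, hB]


-- ===== VERDICT (by name: the statement is the Claim_ definition above) =====
theorem count_splits_spec : Claim_equal_count_splits := by
  intro numbers _ hpre
  unfold Spec_count_splits
  exact pvMain numbers hpre
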